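-- pv_equiv track=rewrite | github.com/ItalSim/legend-simulation-analysis | NeutronProdVsCapture/code/neutronProdvsCapture.py | countVolumes
-- ===== SOURCE A (Python) =====
-- def countVolumes(histVolume):
--     aux_W    = 0
--     aux_C    = 0
--     aux_V    = 0
--     aux_Le   = 0
--     aux_M    = 0
--     aux_Li   = 0
--     aux_R    = 0
--     aux_U    = 0
--     aux_G    = 0
--     aux_else = 0
--
--     for volume in histVolume:
--         if volume == -10:
--             aux_W += 1
--         elif (volume == -9) or (volume == -8) or (volume == -7) or (volume == -5):
--             aux_C += 1
--         elif volume == -6: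
--             aux_V += 1
--         elif volume == -41:
--             aux_Le += 1
--         elif volume == -42:
--             aux_Li += 1
--         elif (volume == -3) or (volume == -2):
--             aux_M += 1
--         elif volume == -1:
--             aux_R += 1
--         elif volume == 0:
--             aux_U += 1
--         elif volume == 1:
--             aux_G += 1
--         else:
--             aux_else += 1
--
--     counts = [aux_else, aux_W, aux_C, aux_V, aux_Le, aux_M, aux_Li, aux_R, aux_U, aux_G]
--     return counts
-- ===== SOURCE B (Python) =====
-- def countVolumes(histVolume):
--     # Staged passes: one list.count per classified value; 'else' is what's left of the total.
--     aux_W  = histVolume.count(-10)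
--     aux_C  = (histVolume.count(-9) + histVolume.count(-8)
--               + histVolume.count(-7) + histVolume.count(-5))
--     aux_V  = histVolume.count(-6)
--     aux_Le = histVolume.count(-41)
--     aux_M  = histVolume.count(-3) + histVolume.count(-2)
--     aux_Li = histVolume.count(-42)
--     aux_R  = histVolume.count(-1)
--     aux_U  = histVolume.count(0)
--     aux_G  = histVolume.count(1)
--     aux_else = len(histVolume) - (aux_W + aux_C + aux_V + aux_Le + aux_M
--                                   + aux_Li + aux_R + aux_U + aux_G)
--     return [aux_else, aux_W, aux_C, aux_V, aux_Le, aux_M, aux_Li, aux_R, aux_U, aux_G]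
-- ===== Notes on version B (the rewrite author's own statement) =====
-- stated objective: idiomatic
-- what changed: B has no classifying loop at all: each labeled bucket is one (or a sum of) direct list.count(value) passes over the list, and the 'else' bucket is computed arithmetically as len(histVolume) minus the classified total, replacing A's single pass through a nine-way elif chain over ten mutable accumulators.
import Mathlib
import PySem

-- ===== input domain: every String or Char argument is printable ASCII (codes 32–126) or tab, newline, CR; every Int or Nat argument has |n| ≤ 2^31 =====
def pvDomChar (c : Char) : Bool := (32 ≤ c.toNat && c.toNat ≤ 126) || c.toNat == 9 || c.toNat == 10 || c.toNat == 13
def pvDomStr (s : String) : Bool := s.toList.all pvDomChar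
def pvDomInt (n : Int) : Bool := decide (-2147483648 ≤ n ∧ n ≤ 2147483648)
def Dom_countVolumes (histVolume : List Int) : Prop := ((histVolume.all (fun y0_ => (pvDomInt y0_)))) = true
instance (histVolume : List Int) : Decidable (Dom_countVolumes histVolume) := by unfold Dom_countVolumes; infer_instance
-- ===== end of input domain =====

-- B drops A's classifying loop entirely: each bucket is a direct list.count pass and the
-- 'else' bucket is len minus the classified total ('idiomatic'; same O(n) cost).

-- ===== PORT A =====
-- loop state: (aux_W, aux_C, aux_V, aux_Le, aux_M, aux_Li, aux_R, aux_U, aux_G, aux_else)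
structure CVState where
  aux_W : Int
  aux_C : Int
  aux_V : Int
  aux_Le : Int
  aux_M : Int
  aux_Li : Int
  aux_R : Int
  aux_U : Int
  aux_G : Int
  aux_else : Int
  deriving DecidableEq, Repr

def cvStep (s : CVState) (volume : Int) : CVState :=
  if volume == -10 then { s with aux_W := s.aux_W + 1 }
  else if (volume == -9) || (volume == -8) || (volume == -7) || (volume == -5) then
    { s with aux_C := s.aux_C + 1 }
  else if volume == -6 then { s with aux_V := s.aux_V + 1 }
  else if volume == -41 then { s with aux_Le := s.aux_Le + 1 }
  else if volume == -42 then { s with aux_Li := s.aux_Li + 1 }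
  else if (volume == -3) || (volume == -2) then { s with aux_M := s.aux_M + 1 }
  else if volume == -1 then { s with aux_R := s.aux_R + 1 }
  else if volume == 0 then { s with aux_U := s.aux_U + 1 }
  else if volume == 1 then { s with aux_G := s.aux_G + 1 }
  else { s with aux_else := s.aux_else + 1 }

def countVolumes (histVolume : List Int) : List Int :=
  let s := histVolume.foldl cvStep ⟨0, 0, 0, 0, 0, 0, 0, 0, 0, 0⟩
  [s.aux_else, s.aux_W, s.aux_C, s.aux_V, s.aux_Le, s.aux_M, s.aux_Li, s.aux_R, s.aux_U, s.aux_G]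

-- ===== PORT B =====
def countVolumes_alt (histVolume : List Int) : List Int :=
  let aux_W  : Int := PySem.List.count histVolume (-10)
  let aux_C  : Int := PySem.List.count histVolume (-9) + PySem.List.count histVolume (-8)
                      + PySem.List.count histVolume (-7) + PySem.List.count histVolume (-5)
  let aux_V  : Int := PySem.List.count histVolume (-6)
  let aux_Le : Int := PySem.List.count histVolume (-41)
  let aux_M  : Int := PySem.List.count histVolume (-3) + PySem.List.count histVolume (-2)
  let aux_Li : Int := PySem.List.count histVolume (-42)
  let aux_R  : Int := PySem.List.count histVolume (-1)
  let aux_U  : Int := PySem.List.count histVolume 0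
  let aux_G  : Int := PySem.List.count histVolume 1
  let aux_else : Int := (histVolume.length : Int)
      - (aux_W + aux_C + aux_V + aux_Le + aux_M + aux_Li + aux_R + aux_U + aux_G)
  [aux_else, aux_W, aux_C, aux_V, aux_Le, aux_M, aux_Li, aux_R, aux_U, aux_G]

-- ===== PRECONDITION & SPEC =====
def Spec_countVolumes (histVolume : List Int) (out : List Int) : Prop := out = countVolumes_alt histVolume
instance (histVolume : List Int) (out : List Int) : Decidable (Spec_countVolumes histVolume out) := by unfold Spec_countVolumes; infer_instance

-- ===== CLAIM =====
def Claim_equal_countVolumes : Prop := ∀ (histVolume : List Int), Dom_countVolumes histVolume → Spec_countVolumes histVolume (countVolumes histVolume)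

-- ===== LEMMAS AND PROOFS =====

-- the fold of A's step, from an arbitrary start state, adds the per-value counts
lemma cvFold_eq (l : List Int) (s : CVState) :
    l.foldl cvStep s =
      ⟨s.aux_W + l.count (-10),
       s.aux_C + (l.count (-9) + l.count (-8) + l.count (-7) + l.count (-5)),
       s.aux_V + l.count (-6),
       s.aux_Le + l.count (-41),
       s.aux_M + (l.count (-3) + l.count (-2)),
       s.aux_Li + l.count (-42),
       s.aux_R + l.count (-1),
       s.aux_U + l.count 0,
       s.aux_G + l.count 1,
       s.aux_else + l.countP (fun x => decide (x ≠ -10 ∧ x ≠ -9 ∧ x ≠ -8 ∧ x ≠ -7 ∧ x ≠ -6 ∧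
         x ≠ -5 ∧ x ≠ -41 ∧ x ≠ -42 ∧ x ≠ -3 ∧ x ≠ -2 ∧ x ≠ -1 ∧ x ≠ 0 ∧ x ≠ 1))⟩ := by
  induction l generalizing s with
  | nil => simp
  | cons x t ih =>
    rw [List.foldl_cons, ih]
    simp only [cvStep]
    split_ifs with h1 h2 h3 h4 h5 h6 h7 h8 h9 <;>
      simp only [beq_iff_eq, Bool.or_eq_true, not_or] at * <;>
      rw [CVState.mk.injEq] <;>
      simp only [List.count_cons, List.countP_cons, beq_iff_eq, decide_eq_true_eq] <;>
      refine ⟨?_, ?_, ?_, ?_, ?_, ?_, ?_, ?_, ?_, ?_⟩ <;>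
      (push_cast ; split_ifs <;> omega)

lemma cvStep_sum (s : CVState) (x : Int) :
    (cvStep s x).aux_W + (cvStep s x).aux_C + (cvStep s x).aux_V + (cvStep s x).aux_Le +
      (cvStep s x).aux_M + (cvStep s x).aux_Li + (cvStep s x).aux_R + (cvStep s x).aux_U +
      (cvStep s x).aux_G + (cvStep s x).aux_else =
    s.aux_W + s.aux_C + s.aux_V + s.aux_Le + s.aux_M + s.aux_Li + s.aux_R + s.aux_U +
      s.aux_G + s.aux_else + 1 := by
  unfold cvStep
  split_ifs <;> simp <;> omega

lemma cvFold_sum (l : List Int) (s : CVState) :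
    (l.foldl cvStep s).aux_W + (l.foldl cvStep s).aux_C + (l.foldl cvStep s).aux_V +
      (l.foldl cvStep s).aux_Le + (l.foldl cvStep s).aux_M + (l.foldl cvStep s).aux_Li +
      (l.foldl cvStep s).aux_R + (l.foldl cvStep s).aux_U + (l.foldl cvStep s).aux_G +
      (l.foldl cvStep s).aux_else =
    s.aux_W + s.aux_C + s.aux_V + s.aux_Le + s.aux_M + s.aux_Li + s.aux_R + s.aux_U +
      s.aux_G + s.aux_else + l.length := by
  induction l generalizing s with
  | nil => simp
  | cons x t ih =>
    rw [List.foldl_cons, ih, cvStep_sum]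
    simp only [List.length_cons]
    push_cast
    omega

-- total length splits into the nine classified buckets plus the else bucket
lemma length_split (l : List Int) :
    (l.length : Int) =
      (l.count (-10) : Int) + (l.count (-9) + l.count (-8) + l.count (-7) + l.count (-5)) +
      l.count (-6) + l.count (-41) + (l.count (-3) + l.count (-2)) + l.count (-42) +
      l.count (-1) + l.count 0 + l.count 1 +
      l.countP (fun x => decide (x ≠ -10 ∧ x ≠ -9 ∧ x ≠ -8 ∧ x ≠ -7 ∧ x ≠ -6 ∧
        x ≠ -5 ∧ x ≠ -41 ∧ x ≠ -42 ∧ x ≠ -3 ∧ x ≠ -2 ∧ x ≠ -1 ∧ x ≠ 0 ∧ x ≠ 1)) := by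
  have h := cvFold_sum l ⟨0, 0, 0, 0, 0, 0, 0, 0, 0, 0⟩
  rw [cvFold_eq] at h
  simp only [zero_add] at h
  omega

-- ===== VERDICT =====
theorem countVolumes_spec : Claim_equal_countVolumes := by
  intro l _
  unfold Spec_countVolumes countVolumes countVolumes_alt
  rw [cvFold_eq]
  simp only [PySem.List.count_eq]
  have h := length_split l
  simp only [zero_add, List.cons.injEq, and_true]
  omega
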